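-- pv_equiv track=rewrite | github.com/SauravSinha76/scaler2 | class8/closest_min_max.py | solve
-- ===== SOURCE A (Python) =====
-- def solve(A):
--     n = len(A)
--
--     max_ele = max(A)
--     min_ele = min(A)
--     if min_ele == max_ele:
--         return 1
--     mini = -1
--     maxi = -1
--     ans = 0
--     for i in range(n-1,-1,-1):
--         if A[i] == max_ele:
--             maxi = i
--             if mini != -1:
--                 ans = max(ans,mini - maxi + 1)
--         elif A[i] == min_ele:
--             mini = i
--             if maxi != -1:
--                 ans = max(ans, maxi - mini + 1)
--     return ans
-- ===== SOURCE B (Python) =====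
-- def solve(A):
--     mn = min(A)
--     mx = max(A)
--     if mn == mx:
--         return 1
--     # staged pipeline: extremes -> run-start indices -> max adjacent span
--     ext = [(i, v == mx) for i, v in enumerate(A) if v == mn or v == mx]
--     starts = [ext[0][0]] + [j for (_, s), (j, t) in zip(ext, ext[1:]) if s != t]
--     return max(b - a + 1 for a, b in zip(starts, starts[1:]))
-- ===== Notes on version B (the rewrite author's own statement) =====
-- stated objective: alternative
-- what changed: A does a backward accumulator scan tracking the latest min/max indices; B is a staged pipeline with no position-tracking loop: it materialises the list of extreme positions, compresses it to run-start indices via zip-with-next, and takes the max adjacent span.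
import Mathlib
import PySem

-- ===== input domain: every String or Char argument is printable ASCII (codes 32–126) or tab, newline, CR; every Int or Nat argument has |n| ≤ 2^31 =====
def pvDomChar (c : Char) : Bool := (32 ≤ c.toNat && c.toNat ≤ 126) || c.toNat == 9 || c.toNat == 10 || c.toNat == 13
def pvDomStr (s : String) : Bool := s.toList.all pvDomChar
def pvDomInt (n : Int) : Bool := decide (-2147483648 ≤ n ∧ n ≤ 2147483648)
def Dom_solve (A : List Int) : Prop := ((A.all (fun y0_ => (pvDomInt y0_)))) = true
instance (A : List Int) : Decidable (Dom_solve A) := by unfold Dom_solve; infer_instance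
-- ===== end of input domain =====

-- B replaces A's backward accumulator scan (tracking latest min/max indices) by a staged
-- pipeline: extremes list -> run-start indices via zip-with-next -> max adjacent span.

-- ===== PORT A =====
def solve (A : List Int) : Int :=
  let n : Int := PySem.List.len A
  let max_ele : Int := (PySem.List.max? A (fun x => x)).getD 0
  let min_ele : Int := (PySem.List.min? A (fun x => x)).getD 0
  if min_ele = max_ele then 1
  else
    let st := (PySem.List.pyRange (n - 1) (-1) (-1)).foldl
      (fun (s : Int × Int × Int) i =>
        -- s = (mini, maxi, ans)
        let v := PySem.List.pyGetD A i 0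
        if v = max_ele then
          (s.1, i, if s.1 ≠ -1 then max s.2.2 (s.1 - i + 1) else s.2.2)
        else if v = min_ele then
          (i, s.2.1, if s.2.1 ≠ -1 then max s.2.2 (s.2.1 - i + 1) else s.2.2)
        else s)
      (-1, -1, 0)
    st.2.2

-- ===== PORT B =====
def solve_alt (A : List Int) : Int :=
  let mn : Int := (PySem.List.min? A (fun x => x)).getD 0
  let mx : Int := (PySem.List.max? A (fun x => x)).getD 0
  if mn = mx then 1
  else
    -- ext = [(i, v == mx) for i, v in enumerate(A) if v == mn or v == mx]
    let ext := ((PySem.List.enumerate A 0).filter (fun p => p.2 == mn || p.2 == mx)).map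
      (fun p => (p.1, p.2 == mx))
    -- ext[0][0]: Python raises IndexError only when ext = [], unreachable under Pre_ (mn ≠ mx)
    let h0 : Int := ((PySem.List.pyGet? ext 0).getD (0, false)).1
    -- [j for (_, s), (j, t) in zip(ext, ext[1:]) if s != t]   (ext[1:] = drop 1, exact)
    let flips := (List.zip ext (ext.drop 1)).filterMap
      (fun pq => if pq.1.2 ≠ pq.2.2 then some pq.2.1 else none)
    let starts := h0 :: flips
    -- max(b - a + 1 for a, b in zip(starts, starts[1:])): raises only when the generator
    -- is empty, unreachable under Pre_ (there is always a type flip when mn ≠ mx)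
    (PySem.List.max? ((List.zip starts (starts.drop 1)).map (fun ab => ab.2 - ab.1 + 1))
      (fun x => x)).getD 0

-- ===== PRECONDITION & SPEC =====
-- Pre_ excludes only the empty list, on which Python's max(A) raises ValueError (in A and in B).
def Pre_solve (A : List Int) : Prop := A ≠ []
instance (A : List Int) : Decidable (Pre_solve A) := by unfold Pre_solve; infer_instance
def pvWitness_solve : List Int := [3, 1, 3, 2, 1]

def Spec_solve (A : List Int) (out : Int) : Prop := out = solve_alt A
instance (A : List Int) (out : Int) : Decidable (Spec_solve A out) := by unfold Spec_solve; infer_instance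

-- ===== CLAIM (what is proved, stated in full; the proofs are below) =====
def Claim_equal_solve : Prop := ∀ (A : List Int), Dom_solve A → Pre_solve A → Spec_solve A (solve A)

-- ===== LEMMAS AND PROOFS =====

-- the list of extreme positions with their type (true = max), in position order
def pvExt (mn mx : Int) (l : List (Int × Int)) : List (Int × Bool) :=
  l.filterMap (fun p => if p.2 = mx then some (p.1, true) else if p.2 = mn then some (p.1, false) else none)

-- A's loop body, restricted to extremes (as a foldr step, since A scans backwards)
def pvAstep (p : Int × Bool) (s : Int × Int × Int) : Int × Int × Int :=
  if p.2 then (s.1, p.1, if s.1 ≠ -1 then max s.2.2 (s.1 - p.1 + 1) else s.2.2)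
  else (p.1, s.2.1, if s.2.1 ≠ -1 then max s.2.2 (s.2.1 - p.1 + 1) else s.2.2)

def pvAFold (L : List (Int × Bool)) : Int × Int × Int := L.foldr pvAstep (-1, -1, 0)
def pvAAns (L : List (Int × Bool)) : Int := (pvAFold L).2.2

-- B's run-start flips, in structural form
def pvFlips : List (Int × Bool) → List Int
  | a :: b :: l => (if a.2 ≠ b.2 then [b.1] else []) ++ pvFlips (b :: l)
  | _ => []

-- max over adjacent spans of a list of run starts
def pvMaxAdj : List Int → Int
  | a :: b :: r => max (b - a + 1) (pvMaxAdj (b :: r))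
  | _ => 0

-- index of the first element of type t, -1 if none (A's mini/maxi registers)
def pvFirst (L : List (Int × Bool)) (t : Bool) : Int :=
  match L with
  | [] => -1
  | p :: l => if p.2 = t then p.1 else pvFirst l t

theorem pvAFold_cons (p : Int × Bool) (L : List (Int × Bool)) :
    pvAFold (p :: L) = pvAstep p (pvAFold L) := rfl

theorem pvAFold_fst (L : List (Int × Bool)) :
    (pvAFold L).1 = pvFirst L false ∧ (pvAFold L).2.1 = pvFirst L true := by
  induction L with
  | nil => simp [pvAFold, pvFirst]
  | cons p l ih =>
    obtain ⟨h1, h2⟩ := ih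
    rw [pvAFold_cons]
    cases hp : p.2 <;> simp [pvAstep, hp, pvFirst, h1, h2]

theorem pvAAns_cons (p : Int × Bool) (L : List (Int × Bool)) :
    pvAAns (p :: L) =
      if pvFirst L (!p.2) ≠ -1 then max (pvAAns L) (pvFirst L (!p.2) - p.1 + 1) else pvAAns L := by
  obtain ⟨h1, h2⟩ := pvAFold_fst L
  unfold pvAAns
  rw [pvAFold_cons]
  cases hp : p.2 <;> simp [pvAstep, hp, h1, h2]

-- collapsing a same-type element that is not the run start does not change A's answer
theorem pvAAns_dup (s i : Int) (t : Bool) (L : List (Int × Bool)) (hsi : s ≤ i) :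
    pvAAns ((s, t) :: (i, t) :: L) = pvAAns ((s, t) :: L) := by
  have hne : ¬((t : Bool) = !t) := by cases t <;> simp
  rw [pvAAns_cons, pvAAns_cons, pvAAns_cons]
  simp only [pvFirst, if_neg hne]
  split_ifs <;> omega

-- flips only depend on the type of the head, not its index
theorem pvFlips_snd (i j : Int) (t : Bool) (l : List (Int × Bool)) :
    pvFlips ((i, t) :: l) = pvFlips ((j, t) :: l) := by
  cases l with
  | nil => rfl
  | cons b l' => simp [pvFlips]

-- B's zip-with-next comprehension computes pvFlips
theorem pvFlips_eq_zip (L : List (Int × Bool)) :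
    (List.zip L (L.drop 1)).filterMap
      (fun pq => if pq.1.2 ≠ pq.2.2 then some pq.2.1 else none) = pvFlips L := by
  match L with
  | [] => rfl
  | [a] => rfl
  | a :: b :: l =>
    have ih := pvFlips_eq_zip (b :: l)
    have hstep : List.zip (a :: b :: l) ((a :: b :: l).drop 1)
        = (a, b) :: List.zip (b :: l) ((b :: l).drop 1) := rfl
    rw [hstep, List.filterMap_cons]
    by_cases h : a.2 = b.2
    · rw [show (if (a, b).1.2 ≠ (a, b).2.2 then some (a, b).2.1 else none) = none from by
        simp [h], ih]
      simp [pvFlips, h]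
    · rw [show (if (a, b).1.2 ≠ (a, b).2.2 then some (a, b).2.1 else none) = some b.1 from by
        simp [h], ih]
      simp [pvFlips, h]

-- MAIN: A's backward answer over the extremes equals the max adjacent run-start span
theorem pvM (l : List (Int × Bool)) (s : Int) (t : Bool) (hs : 0 ≤ s)
    (hlt : ∀ p ∈ l, s < p.1) (hpw : l.Pairwise (fun p q => p.1 < q.1)) :
    pvAAns ((s, t) :: l) = pvMaxAdj (s :: pvFlips ((s, t) :: l)) := by
  induction l generalizing s t with
  | nil =>
    rw [pvAAns_cons]
    simp [pvAAns, pvAFold, pvFirst, pvFlips, pvMaxAdj]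
  | cons p l' ih =>
    obtain ⟨i, u⟩ := p
    have hsi : s < i := hlt (i, u) (by simp)
    have hlt' : ∀ q ∈ l', i < q.1 := fun q hq => (List.pairwise_cons.mp hpw).1 q hq
    have hlts : ∀ q ∈ l', s < q.1 := fun q hq => lt_trans hsi (hlt' q hq)
    by_cases hu : u = t
    · subst hu
      rw [pvAAns_dup s i u l' (le_of_lt hsi)]
      have hfl : pvFlips ((s, u) :: (i, u) :: l') = pvFlips ((s, u) :: l') := by
        simp [pvFlips]
        exact (pvFlips_snd i s u l')
      rw [hfl]
      exact ih s u hs hlts hpw.tail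
    · have hbang : u = !t := by cases u <;> cases t <;> simp_all
      have hfst : pvFirst ((i, u) :: l') (!t) = i := by simp [pvFirst, hbang]
      rw [pvAAns_cons (s, t)]
      simp only [hfst]
      rw [if_pos (show (i : Int) ≠ -1 by omega)]
      have hfl : pvFlips ((s, t) :: (i, u) :: l') = i :: pvFlips ((i, u) :: l') := by
        have hut : ¬ t = u := fun h => hu h.symm
        simp [pvFlips, hut]
      rw [hfl]
      show max (pvAAns ((i, u) :: l')) (i - s + 1) = pvMaxAdj (s :: i :: pvFlips ((i, u) :: l'))
      rw [show pvMaxAdj (s :: i :: pvFlips ((i, u) :: l')) =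
            max (i - s + 1) (pvMaxAdj (i :: pvFlips ((i, u) :: l'))) from rfl,
          ← ih i u (by omega) hlt' hpw.tail]
      exact max_comm _ _

-- run starts are strictly increasing
theorem pvStartsSorted (l : List (Int × Bool)) (s : Int) (t : Bool)
    (hlt : ∀ p ∈ l, s < p.1) (hpw : l.Pairwise (fun p q => p.1 < q.1)) :
    (s :: pvFlips ((s, t) :: l)).Pairwise (fun a b => a < b) := by
  induction l generalizing s t with
  | nil => simp [pvFlips]
  | cons p l' ih =>
    obtain ⟨i, u⟩ := p
    have hsi : s < i := hlt (i, u) (by simp)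
    have hlt' : ∀ q ∈ l', i < q.1 := fun q hq => (List.pairwise_cons.mp hpw).1 q hq
    have hlts : ∀ q ∈ l', s < q.1 := fun q hq => lt_trans hsi (hlt' q hq)
    by_cases hu : u = t
    · subst hu
      have hfl : pvFlips ((s, u) :: (i, u) :: l') = pvFlips ((s, u) :: l') := by
        simp [pvFlips]
        exact (pvFlips_snd i s u l')
      rw [hfl]
      exact ih s u hlts hpw.tail
    · have hfl : pvFlips ((s, t) :: (i, u) :: l') = i :: pvFlips ((i, u) :: l') := by
        have hut : ¬ t = u := fun h => hu h.symm
        simp [pvFlips, hut]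
      rw [hfl]
      have hI := ih i u hlt' hpw.tail
      refine List.pairwise_cons.mpr ⟨?_, hI⟩
      intro x hx
      rcases List.mem_cons.mp hx with h | h
      · omega
      · have := (List.pairwise_cons.mp hI).1 x h
        omega

-- max over the zip-with-next spans equals pvMaxAdj on a strictly increasing start list
theorem pvMaxFold (r : List Int) (b acc : Int) (hacc : 0 ≤ acc)
    (hpw : (b :: r).Pairwise (fun a b => a < b)) :
    ((List.zip (b :: r) r).map (fun ab => ab.2 - ab.1 + 1)).foldl max acc
      = max acc (pvMaxAdj (b :: r)) := by
  induction r generalizing b acc with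
  | nil => simp [pvMaxAdj]; omega
  | cons c r' ih =>
    have hbc : b < c := (List.pairwise_cons.mp hpw).1 c (by simp)
    simp only [List.zip_cons_cons, List.map_cons, List.foldl_cons]
    rw [ih c (max acc (c - b + 1)) (by omega) hpw.tail]
    show max (max acc (c - b + 1)) (pvMaxAdj (c :: r'))
        = max acc (max (c - b + 1) (pvMaxAdj (c :: r')))
    exact max_assoc _ _ _

theorem pvMaxTotal (starts : List Int) (hpw : starts.Pairwise (fun a b => a < b)) :
    ((PySem.List.max? ((List.zip starts (starts.drop 1)).map (fun ab => ab.2 - ab.1 + 1))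
      (fun x => x)).getD 0) = pvMaxAdj starts := by
  match starts with
  | [] => rfl
  | [a] => rfl
  | a :: b :: r =>
    have hab : a < b := (List.pairwise_cons.mp hpw).1 b (by simp)
    simp only [List.drop_succ_cons, List.drop_zero, List.zip_cons_cons, List.map_cons]
    rw [PySem.List.max?_id_cons]
    simp only [Option.getD_some]
    rw [pvMaxFold r b (b - a + 1) (by omega) hpw.tail]
    show max (b - a + 1) (pvMaxAdj (b :: r)) = pvMaxAdj (a :: b :: r)
    rfl

-- the filter-then-map comprehension of B builds the same extremes list
theorem pvExt_eq_fm (mn mx : Int) (hne : ¬ mn = mx) (l : List (Int × Int)) :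
    (l.filter (fun p => p.2 == mn || p.2 == mx)).map (fun p => (p.1, p.2 == mx))
      = pvExt mn mx l := by
  induction l with
  | nil => rfl
  | cons p l' ih =>
    unfold pvExt at *
    by_cases h2 : p.2 = mx
    · simp [List.filterMap_cons, h2, ih]
    · by_cases h3 : p.2 = mn
      · simp [List.filterMap_cons, h3, ih, hne]
      · simp [List.filterMap_cons, h2, h3, ih]

-- both ports map an extreme entry of the enumeration through the same option
theorem pvKey (mn mx : Int) (x : Int × Int) (p : Int × Bool)
    (h : (if x.2 = mx then some (x.1, true) else if x.2 = mn then some (x.1, false) else none)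
      = some p) : p.1 = x.1 := by
  split at h
  · cases h; rfl
  · split at h
    · cases h; rfl
    · cases h

-- A's whole loop, over the extremes of the enumerated list
theorem pvSolve_eq_aAns (A : List Int) (mn mx : Int)
    (hmn : (PySem.List.min? A (fun x => x)).getD 0 = mn)
    (hmx : (PySem.List.max? A (fun x => x)).getD 0 = mx) (hne : ¬ mn = mx) :
    solve A = pvAAns (pvExt mn mx (PySem.List.enumerate A 0)) := by
  unfold solve
  simp only [hmn, hmx, if_neg hne, PySem.List.len_eq]
  rw [show PySem.List.pyRange ((A.length : Int) - 1) (-1) (-1)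
      = (PySem.List.pyRange 0 (A.length : Int) 1).reverse from by
    rw [PySem.List.pyRange_neg_one_eq_reverse]; norm_num]
  rw [List.foldl_reverse]
  have henum := PySem.List.enumerate_eq_map_pyRange A 0
  rw [PySem.List.len_eq] at henum
  unfold pvAAns pvAFold pvExt
  rw [henum, List.foldr_filterMap, List.foldr_map]
  refine congrArg (fun (t : Int × Int × Int) => t.2.2) ?_
  congr 1
  funext j st
  by_cases h2 : PySem.List.pyGetD A j 0 = mx
  · simp [h2, pvAstep]
  · by_cases h3 : PySem.List.pyGetD A j 0 = mn <;> simp [h2, h3, pvAstep, hne]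

theorem pvExt_pairwise (mn mx : Int) (A : List Int) :
    (pvExt mn mx (PySem.List.enumerate A 0)).Pairwise (fun p q => p.1 < q.1) := by
  unfold pvExt
  rw [List.pairwise_filterMap]
  apply (PySem.List.pairwise_lt_enumerate A 0).imp
  intro a b hab p hp q hq
  have h1 := pvKey mn mx a p hp
  have h2 := pvKey mn mx b q hq
  omega

theorem pvExt_nonneg (mn mx : Int) (A : List Int) :
    ∀ p ∈ pvExt mn mx (PySem.List.enumerate A 0), 0 ≤ p.1 := by
  intro p hp
  obtain ⟨q, hq, hgq⟩ := List.mem_filterMap.mp hp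
  obtain ⟨k, hk, hqe⟩ := (PySem.List.mem_enumerate_iff A 0 q).mp hq
  have h1 := pvKey mn mx q p hgq
  have h2 : q.1 = (0 : Int) + k := by rw [hqe]
  omega

-- the extremes list is nonempty when A is nonempty (the max occurs somewhere)
theorem pvExt_ne_nil (A : List Int) (mn mx : Int) (hA : A ≠ [])
    (hmx : (PySem.List.max? A (fun x => x)).getD 0 = mx) :
    pvExt mn mx (PySem.List.enumerate A 0) ≠ [] := by
  obtain ⟨m, hm⟩ := Option.ne_none_iff_exists'.mp
    (fun h => hA ((PySem.List.max?_eq_none_iff A (fun x => x)).mp h))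
  have hmem : m ∈ A := PySem.List.max?_mem hm
  have hmmx : m = mx := by rw [hm] at hmx; simpa using hmx
  obtain ⟨k, hk, hAk⟩ := List.mem_iff_getElem.mp hmem
  intro hnil
  have : ((0 : Int) + k, A[k]) ∈ PySem.List.enumerate A 0 :=
    (PySem.List.mem_enumerate_iff A 0 _).mpr ⟨k, hk, rfl⟩
  have : ((0 : Int) + k, true) ∈ pvExt mn mx (PySem.List.enumerate A 0) := by
    unfold pvExt
    exact List.mem_filterMap.mpr ⟨((0 : Int) + k, A[k]), this, by simp [hAk, hmmx]⟩
  rw [hnil] at this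
  exact absurd this (List.not_mem_nil)

-- ===== VERDICT (by name: the statement is the Claim_ definition above) =====
theorem solve_spec : Claim_equal_solve := by
  intro A _ hpre
  unfold Spec_solve
  set mn : Int := (PySem.List.min? A (fun x => x)).getD 0 with hmn
  set mx : Int := (PySem.List.max? A (fun x => x)).getD 0 with hmx
  by_cases hne : mn = mx
  · unfold solve solve_alt
    rw [← hmn, ← hmx]
    simp [hne]
  · rw [pvSolve_eq_aAns A mn mx hmn.symm hmx.symm hne]
    unfold solve_alt
    rw [← hmn, ← hmx]
    simp only [if_neg hne]
    rw [pvExt_eq_fm mn mx hne (PySem.List.enumerate A 0)]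
    set ext := pvExt mn mx (PySem.List.enumerate A 0) with hext
    cases hL : ext with
    | nil => exact absurd hL (pvExt_ne_nil A mn mx hpre hmx.symm)
    | cons p rest =>
      obtain ⟨i, t⟩ := p
      have hpw := pvExt_pairwise mn mx A
      have hnn := pvExt_nonneg mn mx A
      rw [← hext, hL] at hpw hnn
      have hi : (0 : Int) ≤ i := hnn (i, t) (by simp)
      have hget : ((PySem.List.pyGet? ((i, t) :: rest) 0).getD ((0 : Int), false)).1 = i := by
        simp [PySem.List.pyGet?, PySem.List.pyIdx?]
      rw [pvFlips_eq_zip ((i, t) :: rest), hget]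
      have hlt' : ∀ q ∈ rest, i < q.1 := fun q hq => (List.pairwise_cons.mp hpw).1 q hq
      rw [pvMaxTotal _ (pvStartsSorted rest i t hlt' hpw.tail)]
      exact pvM rest i t hi hlt' hpw.tail
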